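-- pv_equiv track=rewrite | github.com/Kazun1998/library_for_python | Convolution/XOR_Convolution.py | Convolution_Power_XOR
-- ===== SOURCE A (Python) =====
-- def Fast_Walsh_Hadamard_Transform_XOR(A):
--     """ XOR に関する Walsh_Hadamard_Transform を行う.
--
--     A: List
--     """
--
--     N=len(A)
--     h=(N-1).bit_length()
--     for k in range(h):
--         bit=1<<k
--         for i in range(N):
--             if i&bit==0:
--                 x=A[i]
--                 y=A[i|bit]
--                 A[i]=(x+y)%Mod
--                 A[i|bit]=(x-y)%Mod
--
-- def Fast_Inverse_Walsh_Hadamard_Transform_XOR(A):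
--     """ XOR に関する逆 Walsh_Hadamard_Transform を行う.
--
--     A: List
--     """
--
--     Fast_Walsh_Hadamard_Transform_XOR(A)
--     N_inv=pow(len(A), -1, Mod)
--     for i in range(len(A)):
--         A[i] = (A[i] * N_inv) % Mod
--
-- def Convolution_Power_XOR(A,k):
--     """ XOR 演算に関する k 回の畳込みを行う.
--
--     A,B: List
--     """
--
--     N=len(A)
--     L=1<<(N-1).bit_length()
--
--     A=A+[0]*(L-N)
--
--     Fast_Walsh_Hadamard_Transform_XOR(A)
--
--     A=[pow(A[i],k,Mod) for i in range(L)]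
--
--     Fast_Inverse_Walsh_Hadamard_Transform_XOR(A)
--     return A
--
-- Mod=998244353
-- ===== SOURCE B (Python) =====
-- Mod = 998244353
--
-- def _wht(a):
--     """Recursive divide-and-conquer Walsh-Hadamard transform (XOR), non-mutating."""
--     n = len(a)
--     if n <= 1:
--         return a[:]
--     half = n // 2
--     lo = _wht(a[:half])
--     hi = _wht(a[half:])
--     return [(lo[i] + hi[i]) % Mod for i in range(half)] + \
--            [(lo[i] - hi[i]) % Mod for i in range(half)]
--
-- def Convolution_Power_XOR(A, k):
--     N = len(A)
--     L = 1 << (N - 1).bit_length()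
--     a = _wht(A + [0] * (L - N))
--     a = [pow(x, k, Mod) for x in a]
--     a = _wht(a)
--     inv = pow(L, -1, Mod)
--     return [x * inv % Mod for x in a]
-- ===== Notes on version B (the rewrite author's own statement) =====
-- stated objective: alternative
-- what changed: The iterative bit-level butterfly Walsh-Hadamard transform (nested loops over bit levels and indices, in-place pair updates) is replaced by a recursive divide-and-conquer transform that splits the power-of-two array into halves, transforms each recursively and combines them elementwise; the rest of the pipeline (pad, pointwise pow, inverse transform, scale by L^-1 mod p) is kept.
import Mathlib
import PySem

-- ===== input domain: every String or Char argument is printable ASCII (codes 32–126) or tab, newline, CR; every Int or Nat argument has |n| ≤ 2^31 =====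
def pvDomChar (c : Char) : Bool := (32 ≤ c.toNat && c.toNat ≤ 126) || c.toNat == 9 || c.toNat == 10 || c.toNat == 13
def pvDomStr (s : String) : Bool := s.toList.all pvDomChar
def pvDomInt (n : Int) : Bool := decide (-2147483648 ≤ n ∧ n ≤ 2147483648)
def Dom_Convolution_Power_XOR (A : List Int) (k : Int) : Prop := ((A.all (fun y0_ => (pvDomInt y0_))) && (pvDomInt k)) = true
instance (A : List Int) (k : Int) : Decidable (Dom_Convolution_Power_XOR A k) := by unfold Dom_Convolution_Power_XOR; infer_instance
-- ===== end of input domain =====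

-- B replaces the iterative bit-level butterfly Walsh–Hadamard transform by a recursive
-- divide-and-conquer transform (split into halves, transform each, combine); same cost class
-- (objective: alternative). A mutates its argument lists in helpers; the equivalence proved
-- here is about the return value only (the top-level function reassigns A and does not mutate
-- the caller's list).

def pvModC : Int := 998244353

-- fast modular exponentiation, = pow(b, e, m) for m > 1.  (PySem.Int.powMod computes b ^ e
-- before reducing, which is infeasible for the exponent m - 2 ≈ 10^9 used below, so the
-- square-and-multiply form of the same builtin is written out here; it is exact: the result
-- is the unique representative of b ^ e in [0, m).)
def powNatMod (b : Int) (e : Nat) (m : Int) : Int :=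
  if h : e = 0 then PySem.Int.mod 1 m
  else
    let r := powNatMod b (e / 2) m
    if e % 2 = 0 then PySem.Int.mod (r * r) m else PySem.Int.mod (r * r * b) m
termination_by e
decreasing_by exact Nat.div_lt_self (Nat.pos_of_ne_zero h) (by norm_num)

-- pow(x, k, Mod) for arbitrary int k (Mod = 998244353 prime): a negative exponent is the
-- modular inverse (Fermat) raised to -k.  Where Python raises ValueError (k < 0 and
-- x ≡ 0 mod Mod) the inputs are excluded by Pre_ below.
def powIntMod (x : Int) (k : Int) (m : Int) : Int :=
  if 0 ≤ k then powNatMod x k.toNat m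
  else powNatMod (powNatMod x (m - 2).toNat m) (-k).toNat m

-- ===== PORT A =====

-- one iteration of the inner 'for i in range(N)' body of Fast_Walsh_Hadamard_Transform_XOR
def fwhtStep (bit : Nat) (B : List Int) (i : Nat) : List Int :=
  if i &&& bit == 0 then
    let x := B.getD i 0
    let y := B.getD (i ||| bit) 0
    (B.set i (PySem.Int.mod (x + y) pvModC)).set (i ||| bit) (PySem.Int.mod (x - y) pvModC)
  else B

-- the inner loop 'for i in range(N): …' at a fixed bit
def fwhtPassN (N : Nat) (B : List Int) (bit : Nat) : List Int :=
  (List.range N).foldl (fwhtStep bit) B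

def Fast_Walsh_Hadamard_Transform_XOR (A : List Int) : List Int :=
  let N := A.length
  let h := PySem.Int.bitLength ((N : Int) - 1)
  (List.range h).foldl (fun B kk => fwhtPassN N B (1 <<< kk)) A

def Fast_Inverse_Walsh_Hadamard_Transform_XOR (A : List Int) : List Int :=
  let B := Fast_Walsh_Hadamard_Transform_XOR A
  let Ninv := powIntMod (A.length : Int) (-1) pvModC
  (List.range A.length).map (fun i => PySem.Int.mod (B.getD i 0 * Ninv) pvModC)

def Convolution_Power_XOR (A : List Int) (k : Int) : List Int :=
  let N := A.length
  let L := 1 <<< PySem.Int.bitLength ((N : Int) - 1)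
  let P := A ++ List.replicate (L - N) 0
  let T := Fast_Walsh_Hadamard_Transform_XOR P
  let Q := (List.range L).map (fun i => powIntMod (T.getD i 0) k pvModC)
  Fast_Inverse_Walsh_Hadamard_Transform_XOR Q

-- ===== PORT B =====

-- recursive divide-and-conquer Walsh–Hadamard transform (Source B's _wht)
def rwht (a : List Int) : List Int :=
  if h : a.length ≤ 1 then a
  else
    let half := a.length / 2
    let lo := rwht (a.take half)
    let hi := rwht (a.drop half)
    ((List.range half).map fun i => PySem.Int.mod (lo.getD i 0 + hi.getD i 0) pvModC) ++
    ((List.range half).map fun i => PySem.Int.mod (lo.getD i 0 - hi.getD i 0) pvModC)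
termination_by a.length
decreasing_by
  · simp only [List.length_take]; omega
  · simp only [List.length_drop]; omega

def Convolution_Power_XOR_alt (A : List Int) (k : Int) : List Int :=
  let N := A.length
  let L := 1 <<< PySem.Int.bitLength ((N : Int) - 1)
  let a1 := rwht (A ++ List.replicate (L - N) 0)
  let a2 := a1.map fun x => powIntMod x k pvModC
  let a3 := rwht a2
  let inv := powIntMod (L : Int) (-1) pvModC
  a3.map fun x => PySem.Int.mod (x * inv) pvModC

-- ===== PRECONDITION & SPEC =====

-- the j-th unnormalised Walsh coefficient of A: Σ_i (-1)^popcount(i & j) · A[i]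
def walshCoeff (A : List Int) (j : Nat) : Int :=
  ((List.range A.length).map fun i =>
    if PySem.Int.bitCount ((i &&& j : Nat) : Int) % 2 = 0 then A.getD i 0 else -(A.getD i 0)).sum

-- Pre_ excludes exactly the inputs where Python A raises ValueError: a negative exponent k
-- together with some Walsh coefficient of A divisible by Mod (pow(0 mod Mod, k<0, Mod) has
-- no inverse).  On every other input A returns normally.
def Pre_Convolution_Power_XOR (A : List Int) (k : Int) : Prop :=
  0 ≤ k ∨ ∀ j ∈ List.range (1 <<< PySem.Int.bitLength ((A.length : Int) - 1)),
    PySem.Int.mod (walshCoeff A j) pvModC ≠ 0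
instance (A : List Int) (k : Int) : Decidable (Pre_Convolution_Power_XOR A k) := by
  unfold Pre_Convolution_Power_XOR; infer_instance

def pvWitness_Convolution_Power_XOR : List Int × Int := ([1, 2, 3], 2)

def Spec_Convolution_Power_XOR (A : List Int) (k : Int) (out : List Int) : Prop := out = Convolution_Power_XOR_alt A k
instance (A : List Int) (k : Int) (out : List Int) : Decidable (Spec_Convolution_Power_XOR A k out) := by unfold Spec_Convolution_Power_XOR; infer_instance

-- ===== CLAIM (what is proved, stated in full; the proofs are below) =====
def Claim_equal_Convolution_Power_XOR : Prop := ∀ (A : List Int) (k : Int), Dom_Convolution_Power_XOR A k → Pre_Convolution_Power_XOR A k → Spec_Convolution_Power_XOR A k (Convolution_Power_XOR A k)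

-- ===== LEMMAS AND PROOFS =====

-- ---- plain bit facts about indices below / above the half boundary 2^s ----

lemma pv_and_two_pow_eq_zero {i s : Nat} (h : i < 2 ^ s) : i &&& 2 ^ s = 0 := by
  rw [Nat.and_two_pow, Nat.testBit_lt_two_pow h]; simp

lemma pv_two_pow_add_eq_or {i s : Nat} (h : i < 2 ^ s) : 2 ^ s + i = 2 ^ s ||| i := by
  simpa using Nat.two_pow_add_eq_or_of_lt h 1

lemma pv_or_two_pow_eq_add {i s : Nat} (h : i < 2 ^ s) : i ||| 2 ^ s = i + 2 ^ s := by
  rw [Nat.or_comm, ← pv_two_pow_add_eq_or h, Nat.add_comm]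

lemma pv_or_lt {k s i : Nat} (hk : k < s) (hi : i < 2 ^ s) : i ||| 2 ^ k < 2 ^ s :=
  Nat.or_lt_two_pow hi (Nat.pow_lt_pow_right (by norm_num) hk)

lemma pv_add_pow_and {k s i : Nat} (hk : k < s) (hi : i < 2 ^ s) :
    (2 ^ s + i) &&& 2 ^ k = i &&& 2 ^ k := by
  rw [pv_two_pow_add_eq_or hi]
  apply Nat.eq_of_testBit_eq
  intro j
  simp only [Nat.testBit_and, Nat.testBit_or, Nat.testBit_two_pow]
  by_cases hj : k = j
  · subst hj
    have : s ≠ k := by omega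
    simp [this]
  · simp [hj]

lemma pv_add_pow_or {k s i : Nat} (hk : k < s) (hi : i < 2 ^ s) :
    (2 ^ s + i) ||| 2 ^ k = 2 ^ s + (i ||| 2 ^ k) := by
  rw [pv_two_pow_add_eq_or hi, pv_two_pow_add_eq_or (pv_or_lt hk hi), Nat.or_assoc]

lemma pv_add_pow_and_self {i s : Nat} (hi : i < 2 ^ s) : (2 ^ s + i) &&& 2 ^ s ≠ 0 := by
  rw [Nat.and_two_pow]
  have : (2 ^ s + i).testBit s = true := by
    rw [pv_two_pow_add_eq_or hi]
    simp [Nat.testBit_or, Nat.testBit_two_pow]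
  rw [this]
  have h2 : 0 < 2 ^ s := Nat.two_pow_pos s
  simp [Nat.pos_iff_ne_zero.mp h2]


-- ---- length preservation ----

lemma length_fwhtStep (bit : Nat) (B : List Int) (i : Nat) :
    (fwhtStep bit B i).length = B.length := by
  unfold fwhtStep; split <;> simp

lemma length_foldl_fwhtStep (bit : Nat) (l : List Nat) (B : List Int) :
    (l.foldl (fwhtStep bit) B).length = B.length := by
  induction l generalizing B with
  | nil => rfl
  | cons a t ih => simp [List.foldl_cons, ih, length_fwhtStep]

lemma length_fwhtPassN (N : Nat) (B : List Int) (bit : Nat) :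
    (fwhtPassN N B bit).length = B.length := length_foldl_fwhtStep _ _ _

-- ---- a butterfly pass with a low bit splits over the two halves ----

lemma fwhtStep_append_left {s k : Nat} (hk : k < s) (X R : List Int)
    (hX : X.length = 2 ^ s) {i : Nat} (hi : i < 2 ^ s) :
    fwhtStep (2 ^ k) (X ++ R) i = fwhtStep (2 ^ k) X i ++ R := by
  have hor : i ||| 2 ^ k < 2 ^ s := pv_or_lt hk hi
  unfold fwhtStep
  by_cases hc : i &&& 2 ^ k = 0
  · simp only [hc, beq_self_eq_true, if_true]
    rw [List.getD_append _ _ _ i (by rw [hX]; exact hi),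
        List.getD_append _ _ _ _ (by rw [hX]; exact hor),
        List.set_append_left _ _ (by rw [hX]; exact hi),
        List.set_append_left _ _ (by rw [List.length_set, hX]; exact hor)]
  · simp only [beq_iff_eq, if_neg hc]

lemma fwhtStep_append_right {s k : Nat} (hk : k < s) (Lft Y : List Int)
    (hL : Lft.length = 2 ^ s) (hY : Y.length = 2 ^ s) {i : Nat} (hi : i < 2 ^ s) :
    fwhtStep (2 ^ k) (Lft ++ Y) (2 ^ s + i) = Lft ++ fwhtStep (2 ^ k) Y i := by
  have hand := pv_add_pow_and hk hi
  have hor := pv_add_pow_or hk hi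
  have horlt : i ||| 2 ^ k < 2 ^ s := pv_or_lt hk hi
  have e1 : 2 ^ s + i - Lft.length = i := by rw [hL]; omega
  have e2 : 2 ^ s + (i ||| 2 ^ k) - Lft.length = i ||| 2 ^ k := by rw [hL]; omega
  unfold fwhtStep
  rw [hand, hor]
  by_cases hc : i &&& 2 ^ k = 0
  · simp only [hc, beq_self_eq_true, if_true]
    rw [List.getD_append_right _ _ _ _ (by rw [hL]; omega), e1,
        List.getD_append_right _ _ _ _ (by rw [hL]; omega), e2,
        List.set_append_right _ _ (by rw [hL]; omega),
        List.set_append_right _ _ (by rw [hL]; omega), e1, e2]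
  · simp only [beq_iff_eq, if_neg hc]

lemma foldl_fwhtStep_append_left {s k : Nat} (hk : k < s) (R : List Int) :
    ∀ (l : List Nat), (∀ i ∈ l, i < 2 ^ s) → ∀ (X : List Int), X.length = 2 ^ s →
      l.foldl (fwhtStep (2 ^ k)) (X ++ R) = l.foldl (fwhtStep (2 ^ k)) X ++ R := by
  intro l
  induction l with
  | nil => intro _ X _; rfl
  | cons a t ih =>
    intro hmem X hX
    simp only [List.foldl_cons]
    rw [fwhtStep_append_left hk X R hX (hmem a (by simp))]
    exact ih (fun i hi => hmem i (by simp [hi])) _ (by rw [length_fwhtStep, hX])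

lemma foldl_fwhtStep_append_right {s k : Nat} (hk : k < s) (Lft : List Int)
    (hL : Lft.length = 2 ^ s) :
    ∀ (l : List Nat), (∀ i ∈ l, i < 2 ^ s) → ∀ (Y : List Int), Y.length = 2 ^ s →
      l.foldl (fun B i => fwhtStep (2 ^ k) B (2 ^ s + i)) (Lft ++ Y) =
        Lft ++ l.foldl (fwhtStep (2 ^ k)) Y := by
  intro l
  induction l with
  | nil => intro _ Y _; rfl
  | cons a t ih =>
    intro hmem Y hY
    simp only [List.foldl_cons]
    rw [fwhtStep_append_right hk Lft Y hL hY (hmem a (by simp))]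
    exact ih (fun i hi => hmem i (by simp [hi])) _ (by rw [length_fwhtStep, hY])

lemma fwhtPassN_append {s k : Nat} (hk : k < s) (lo hi : List Int)
    (hlo : lo.length = 2 ^ s) (hhi : hi.length = 2 ^ s) :
    fwhtPassN (2 ^ (s + 1)) (lo ++ hi) (2 ^ k) =
      fwhtPassN (2 ^ s) lo (2 ^ k) ++ fwhtPassN (2 ^ s) hi (2 ^ k) := by
  unfold fwhtPassN
  have h2 : 2 ^ (s + 1) = 2 ^ s + 2 ^ s := by ring
  rw [h2, List.range_add, List.foldl_append]
  rw [foldl_fwhtStep_append_left hk hi (List.range (2 ^ s))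
        (fun i h => List.mem_range.mp h) lo hlo]
  rw [List.foldl_map]
  rw [foldl_fwhtStep_append_right hk _ (by rw [length_foldl_fwhtStep, hlo])
        (List.range (2 ^ s)) (fun i h => List.mem_range.mp h) hi hhi]

-- ---- the pass at the top bit 2^s is the recursive combine ----

lemma foldl_fwhtStep_high_noop {s : Nat} (bit : Nat) (hbit : bit = 2 ^ s) :
    ∀ (l : List Nat), (∀ i ∈ l, i < 2 ^ s) → ∀ (Z : List Int),
      (l.map (fun i => 2 ^ s + i)).foldl (fwhtStep bit) Z = Z := by
  intro l
  induction l with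
  | nil => intro _ Z; rfl
  | cons a t ih =>
    intro hmem Z
    simp only [List.map_cons, List.foldl_cons]
    have hstep : fwhtStep bit Z (2 ^ s + a) = Z := by
      unfold fwhtStep
      have := pv_add_pow_and_self (i := a) (s := s) (hmem a (by simp))
      simp [hbit, this]
    rw [hstep, ih (fun i hi => hmem i (by simp [hi]))]

lemma foldl_fwhtStep_combine {s : Nat} (X Y : List Int)
    (hX : X.length = 2 ^ s) (hY : Y.length = 2 ^ s) :
    ∀ t, t ≤ 2 ^ s →
      (List.range t).foldl (fwhtStep (2 ^ s)) (X ++ Y) =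
        ((List.zipWith (fun a b => PySem.Int.mod (a + b) pvModC) X Y).take t ++ X.drop t) ++
        ((List.zipWith (fun a b => PySem.Int.mod (a - b) pvModC) X Y).take t ++ Y.drop t) := by
  intro t
  induction t with
  | zero => intro _; simp
  | succ t ih =>
    intro ht
    have htlt : t < 2 ^ s := by omega
    have hPlen : (List.zipWith (fun a b => PySem.Int.mod (a + b) pvModC) X Y).length = 2 ^ s := by
      simp [hX, hY]
    have hMlen : (List.zipWith (fun a b => PySem.Int.mod (a - b) pvModC) X Y).length = 2 ^ s := by
      simp [hX, hY]
    set P := List.zipWith (fun a b => PySem.Int.mod (a + b) pvModC) X Y with hP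
    set M := List.zipWith (fun a b => PySem.Int.mod (a - b) pvModC) X Y with hM
    have htX : t < X.length := by omega
    have htY : t < Y.length := by omega
    have htP : t < P.length := by omega
    have htM : t < M.length := by omega
    have hPt : (P.take t).length = t := by rw [List.length_take]; omega
    have hMt : (M.take t).length = t := by rw [List.length_take]; omega
    have hA1 : (P.take t ++ X.drop t).length = 2 ^ s := by
      rw [List.length_append, hPt, List.length_drop]; omega
    have hXdrop : X.drop t = X[t] :: X.drop (t + 1) := List.drop_eq_getElem_cons htX
    have hYdrop : Y.drop t = Y[t] :: Y.drop (t + 1) := List.drop_eq_getElem_cons htY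
    have hPtake : P.take (t + 1) = P.take t ++ [P[t]] := by
      rw [List.take_succ, List.getElem?_eq_getElem htP]; rfl
    have hMtake : M.take (t + 1) = M.take t ++ [M[t]] := by
      rw [List.take_succ, List.getElem?_eq_getElem htM]; rfl
    rw [List.range_succ, List.foldl_append, ih (by omega), List.foldl_cons, List.foldl_nil]
    unfold fwhtStep
    rw [pv_and_two_pow_eq_zero htlt]
    simp only [beq_self_eq_true, if_true]
    rw [pv_or_two_pow_eq_add htlt]
    have hgx : (List.take t P ++ List.drop t X ++ (List.take t M ++ List.drop t Y)).getD t 0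
        = X[t] := by
      rw [List.getD_append _ _ _ _ (by rw [hA1]; exact htlt),
          List.getD_append_right _ _ _ _ (by rw [hPt]),
          hPt, Nat.sub_self, hXdrop, List.getD_cons_zero]
    have hgy : (List.take t P ++ List.drop t X ++ (List.take t M ++ List.drop t Y)).getD
        (t + 2 ^ s) 0 = Y[t] := by
      rw [List.getD_append_right _ _ _ _ (by rw [hA1]; omega), hA1]
      have hsub : t + 2 ^ s - 2 ^ s = t := by omega
      rw [hsub, List.getD_append_right _ _ _ _ (by rw [hMt]),
          hMt, Nat.sub_self, hYdrop, List.getD_cons_zero]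
    rw [hgx, hgy]
    rw [List.set_append_left _ _ (by rw [hA1]; exact htlt)]
    rw [List.set_append_right _ _ (by rw [List.length_set, hA1]; omega)]
    rw [List.length_set, hA1]
    have hsub : t + 2 ^ s - 2 ^ s = t := by omega
    rw [hsub]
    rw [List.set_append_right _ _ (by rw [hPt])]
    rw [hPt, Nat.sub_self, hXdrop, List.set_cons_zero]
    rw [List.set_append_right _ _ (by rw [hMt])]
    rw [hMt, Nat.sub_self, hYdrop, List.set_cons_zero]
    have hPv : P[t] = PySem.Int.mod (X[t] + Y[t]) pvModC := List.getElem_zipWith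
    have hMv : M[t] = PySem.Int.mod (X[t] - Y[t]) pvModC := List.getElem_zipWith
    rw [hPv.symm, hMv.symm]
    rw [hPtake, hMtake]
    simp only [List.append_assoc, List.singleton_append]

lemma fwhtPassN_top (s : Nat) (X Y : List Int)
    (hX : X.length = 2 ^ s) (hY : Y.length = 2 ^ s) :
    fwhtPassN (2 ^ (s + 1)) (X ++ Y) (2 ^ s) =
      List.zipWith (fun a b => PySem.Int.mod (a + b) pvModC) X Y ++
      List.zipWith (fun a b => PySem.Int.mod (a - b) pvModC) X Y := by
  unfold fwhtPassN
  have h2 : 2 ^ (s + 1) = 2 ^ s + 2 ^ s := by ring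
  rw [h2, List.range_add, List.foldl_append]
  rw [foldl_fwhtStep_combine X Y hX hY (2 ^ s) (le_refl _)]
  rw [foldl_fwhtStep_high_noop (2 ^ s) rfl (List.range (2 ^ s)) (fun i h => List.mem_range.mp h)]
  have hzp : (List.zipWith (fun a b => PySem.Int.mod (a + b) pvModC) X Y).length = 2 ^ s := by
    simp [hX, hY]
  have hzm : (List.zipWith (fun a b => PySem.Int.mod (a - b) pvModC) X Y).length = 2 ^ s := by
    simp [hX, hY]
  rw [List.take_of_length_le (le_of_eq hzp), List.take_of_length_le (le_of_eq hzm),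
      List.drop_of_length_le (le_of_eq hX), List.drop_of_length_le (le_of_eq hY)]
  simp

-- ---- the iterative transform (h ascending passes) ----

def iterW (h N : Nat) (X : List Int) : List Int :=
  (List.range h).foldl (fun B kk => fwhtPassN N B (1 <<< kk)) X

lemma length_iterW (h N : Nat) (X : List Int) : (iterW h N X).length = X.length := by
  unfold iterW
  induction h with
  | zero => rfl
  | succ n ih => rw [List.range_succ, List.foldl_append, List.foldl_cons, List.foldl_nil,
                     length_fwhtPassN, ih]

lemma iterW_succ (h N : Nat) (X : List Int) :
    iterW (h + 1) N X = fwhtPassN N (iterW h N X) (1 <<< h) := by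
  unfold iterW; rw [List.range_succ, List.foldl_append]; rfl

lemma iterW_append {s : Nat} :
    ∀ h, h ≤ s → ∀ (lo hi : List Int), lo.length = 2 ^ s → hi.length = 2 ^ s →
      iterW h (2 ^ (s + 1)) (lo ++ hi) = iterW h (2 ^ s) lo ++ iterW h (2 ^ s) hi := by
  intro h
  induction h with
  | zero => intro _ lo hi _ _; rfl
  | succ n ih =>
    intro hns lo hi hlo hhi
    rw [iterW_succ, iterW_succ, iterW_succ,
        ih (by omega) lo hi hlo hhi, Nat.shiftLeft_eq, one_mul]
    exact fwhtPassN_append (by omega) _ _ (by rw [length_iterW, hlo]) (by rw [length_iterW, hhi])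

-- zipWith as B's indexed comprehension
lemma zip_add_eq (X Y : List Int) {n : Nat} (hX : X.length = n) (hY : Y.length = n) :
    List.zipWith (fun a b => PySem.Int.mod (a + b) pvModC) X Y =
      (List.range n).map (fun i => PySem.Int.mod (X.getD i 0 + Y.getD i 0) pvModC) := by
  apply List.ext_getElem
  · simp [hX, hY]
  · intro i h1 h2
    have hi : i < n := by simp [hX, hY] at h1; omega
    simp [List.getElem_zipWith, List.getD_eq_getElem?_getD, List.getElem?_eq_getElem,
          hX ▸ hi, hY ▸ hi]

lemma zip_sub_eq (X Y : List Int) {n : Nat} (hX : X.length = n) (hY : Y.length = n) :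
    List.zipWith (fun a b => PySem.Int.mod (a - b) pvModC) X Y =
      (List.range n).map (fun i => PySem.Int.mod (X.getD i 0 - Y.getD i 0) pvModC) := by
  apply List.ext_getElem
  · simp [hX, hY]
  · intro i h1 h2
    have hi : i < n := by simp [hX, hY] at h1; omega
    simp [List.getElem_zipWith, List.getD_eq_getElem?_getD, List.getElem?_eq_getElem,
          hX ▸ hi, hY ▸ hi]

-- ---- iterative = recursive, on power-of-two lengths ----

-- rwht preserves length on power-of-two inputs
lemma rwht_length_eq : ∀ (s : Nat) (X : List Int), X.length = 2 ^ s →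
    (rwht X).length = 2 ^ s := by
  intro s X hX
  cases s with
  | zero => rw [rwht, dif_pos (by rw [hX]; norm_num)]; exact hX
  | succ n =>
    have hlen : ¬ X.length ≤ 1 := by
      rw [hX]
      have : 1 < 2 ^ (n + 1) := Nat.one_lt_two_pow (by omega)
      omega
    rw [rwht, dif_neg hlen]
    have h2 : (2 : Nat) ^ (n + 1) = 2 ^ n + 2 ^ n := by ring
    simp only [List.length_append, List.length_map, List.length_range]
    rw [hX]
    omega


lemma iterW_eq_rwht : ∀ (s : Nat) (X : List Int), X.length = 2 ^ s →
    iterW s (2 ^ s) X = rwht X := by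
  intro s
  induction s with
  | zero =>
    intro X hX
    rw [rwht]
    simp [iterW, hX]
  | succ n ih =>
    intro X hX
    have hlo : (X.take (2 ^ n)).length = 2 ^ n := by
      simp [hX]; omega
    have hhi : (X.drop (2 ^ n)).length = 2 ^ n := by
      simp [hX]; omega
    rw [iterW_succ, Nat.shiftLeft_eq, one_mul]
    conv_lhs => rw [← List.take_append_drop (2 ^ n) X]
    rw [iterW_append n (le_refl n) _ _ hlo hhi]
    rw [ih _ hlo, ih _ hhi]
    rw [fwhtPassN_top n _ _ (rwht_length_eq _ _ hlo) (rwht_length_eq _ _ hhi)]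
    have hlen : ¬ X.length ≤ 1 := by
      rw [hX]
      have : 1 < 2 ^ (n + 1) := Nat.one_lt_two_pow (by omega)
      omega
    have hhalf : X.length / 2 = 2 ^ n := by rw [hX]; omega
    conv_rhs => rw [rwht]
    simp only [dif_neg hlen, hhalf]
    rw [zip_add_eq _ _ (rwht_length_eq _ _ hlo) (rwht_length_eq _ _ hhi),
        zip_sub_eq _ _ (rwht_length_eq _ _ hlo) (rwht_length_eq _ _ hhi)]


-- ---- bit_length of 2^s - 1 ----

lemma bitLength_pred_pow (s : Nat) :
    PySem.Int.bitLength (((2 ^ s : Nat) : Int) - 1) = s := by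
  induction s with
  | zero => simp [PySem.Int.bitLength_zero]
  | succ n ih =>
    have h1 : (1 : Nat) ≤ 2 ^ (n + 1) := Nat.one_le_two_pow
    have hcast : ((2 ^ (n + 1) : Nat) : Int) - 1 = ((2 ^ (n + 1) - 1 : Nat) : Int) := by
      push_cast [h1]; ring
    have hpos : 0 < 2 ^ (n + 1) - 1 := by
      have : 1 < 2 ^ (n + 1) := Nat.one_lt_two_pow (by omega)
      omega
    rw [hcast, PySem.Int.bitLength_natCast hpos]
    have hdiv : (2 ^ (n + 1) - 1) / 2 = 2 ^ n - 1 := by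
      have : (2 : Nat) ^ (n + 1) = 2 ^ n + 2 ^ n := by ring
      omega
    rw [hdiv]
    have hcast2 : ((2 ^ n - 1 : Nat) : Int) = ((2 ^ n : Nat) : Int) - 1 := by
      push_cast [Nat.one_le_two_pow]; ring
    rw [hcast2, ih]

-- range-indexed map over a list of matching length is List.map (bridges A's
-- 'for i in range(L)' comprehensions to B's per-element comprehensions)
lemma range_map_pow (xs : List Int) (k : Int) {n : Nat} (h : xs.length = n) :
    (List.range n).map (fun i => powIntMod (xs.getD i 0) k pvModC) =
      xs.map (fun x => powIntMod x k pvModC) := by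
  apply List.ext_getElem
  · simp [h]
  · intro i h1 h2
    have hi : i < n := by simpa using h1
    simp [List.getD_eq_getElem?_getD, h ▸ hi]

lemma range_map_mul (xs : List Int) (c : Int) {n : Nat} (h : xs.length = n) :
    (List.range n).map (fun i => PySem.Int.mod (xs.getD i 0 * c) pvModC) =
      xs.map (fun x => PySem.Int.mod (x * c) pvModC) := by
  apply List.ext_getElem
  · simp [h]
  · intro i h1 h2
    have hi : i < n := by simpa using h1
    simp [List.getD_eq_getElem?_getD, h ▸ hi]

-- the iterative transform is the recursive one, on power-of-two lengths
lemma fwht_eq_rwht (s : Nat) (X : List Int) (hX : X.length = 2 ^ s) :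
    Fast_Walsh_Hadamard_Transform_XOR X = rwht X := by
  show (List.range (PySem.Int.bitLength ((X.length : Int) - 1))).foldl
      (fun B kk => fwhtPassN X.length B (1 <<< kk)) X = rwht X
  have hbl : PySem.Int.bitLength ((X.length : Int) - 1) = s := by
    rw [hX]; exact_mod_cast bitLength_pred_pow s
  rw [hbl, hX]
  exact iterW_eq_rwht s X hX

-- ===== VERDICT (by name: the statement is the Claim_ definition above) =====
theorem Convolution_Power_XOR_spec : Claim_equal_Convolution_Power_XOR := by
  intro A k _ _
  unfold Spec_Convolution_Power_XOR Convolution_Power_XOR Convolution_Power_XOR_alt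
    Fast_Inverse_Walsh_Hadamard_Transform_XOR
  simp only [Nat.shiftLeft_eq, one_mul]
  set s := PySem.Int.bitLength ((A.length : Int) - 1) with hs
  have hNL : A.length ≤ 2 ^ s := by
    rcases Nat.eq_zero_or_pos A.length with h0 | h1
    · rw [h0]; exact Nat.zero_le _
    · have hlt := PySem.Int.lt_two_pow_bitLength ((A.length : Int) - 1)
      have habs : ((A.length : Int) - 1).natAbs = A.length - 1 := by omega
      rw [habs, ← hs] at hlt
      omega
  set P := A ++ List.replicate (2 ^ s - A.length) 0 with hPdef
  have hP : P.length = 2 ^ s := by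
    rw [hPdef, List.length_append, List.length_replicate]; omega
  rw [fwht_eq_rwht s P hP]
  have hTlen : (rwht P).length = 2 ^ s := rwht_length_eq s P hP
  rw [range_map_pow (rwht P) k hTlen]
  set Q := (rwht P).map (fun x => powIntMod x k pvModC) with hQ
  have hQlen : Q.length = 2 ^ s := by rw [hQ, List.length_map, hTlen]
  rw [fwht_eq_rwht s Q hQlen, hQlen]
  rw [range_map_mul (rwht Q) _ (rwht_length_eq s Q hQlen)]
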